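-- pv_equiv track=rewrite | github.com/gwarmstrong/taxanet | kraken_net.py | _get_nodes_to_all_ancestors
-- ===== SOURCE A (Python) =====
-- def _get_nodes_to_all_ancestors(nodes, root=1, ancestors=None):
--     if ancestors is None:
--         ancestors = {0: set()}
--     if root not in ancestors:
--         ancestors[root] = set()
--     if root in nodes:
--         for child in nodes[root]:
--             if child not in ancestors:
--                 ancestors[child] = set()
--             ancestors[child].update(ancestors[root])
--             ancestors[child].add(root)
--             _get_nodes_to_all_ancestors(nodes, root=child, ancestors=ancestors)
--     return ancestors
-- ===== SOURCE B (Python) =====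
-- def _get_nodes_to_all_ancestors(nodes, root=1, ancestors=None):
--     # Iterative DFS with an explicit frame stack instead of recursion (same
--     # results, mutates a passed-in `ancestors` dict in place exactly like A).
--     if ancestors is None:
--         ancestors = {0: set()}
--     if root not in ancestors:
--         ancestors[root] = set()
--     stack = [(root, list(nodes[root]))] if root in nodes else []
--     while stack:
--         node, pending = stack[-1]
--         if not pending:
--             stack.pop()
--             continue
--         child = pending.pop(0)
--         anc = ancestors.setdefault(child, set())
--         anc.update(ancestors[node])
--         anc.add(node)
--         if child in nodes:
--             stack.append((child, list(nodes[child])))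
--     return ancestors
-- ===== Notes on version B (the rewrite author's own statement) =====
-- stated objective: alternative
-- what changed: A's recursive depth-first traversal is replaced by an iterative while-loop over an explicit stack of (node, pending-children) frames; same values, no Python recursion.
import Mathlib
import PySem

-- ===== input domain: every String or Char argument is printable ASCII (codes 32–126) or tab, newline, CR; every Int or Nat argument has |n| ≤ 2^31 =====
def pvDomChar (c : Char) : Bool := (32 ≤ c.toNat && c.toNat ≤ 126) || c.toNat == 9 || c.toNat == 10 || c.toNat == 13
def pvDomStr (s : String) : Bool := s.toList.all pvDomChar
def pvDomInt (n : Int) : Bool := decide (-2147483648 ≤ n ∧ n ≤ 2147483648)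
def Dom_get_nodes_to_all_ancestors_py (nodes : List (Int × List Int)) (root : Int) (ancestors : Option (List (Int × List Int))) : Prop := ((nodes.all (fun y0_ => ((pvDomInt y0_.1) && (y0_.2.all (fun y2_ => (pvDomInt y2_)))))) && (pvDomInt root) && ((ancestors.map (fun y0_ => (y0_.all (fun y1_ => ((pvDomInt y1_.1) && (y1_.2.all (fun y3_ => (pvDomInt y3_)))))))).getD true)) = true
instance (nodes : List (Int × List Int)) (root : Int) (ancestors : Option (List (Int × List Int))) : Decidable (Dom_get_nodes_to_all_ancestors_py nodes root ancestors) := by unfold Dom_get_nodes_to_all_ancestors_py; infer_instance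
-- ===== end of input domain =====

-- B replaces A's recursive DFS by an iterative DFS over an explicit frame stack (same return value;
-- like A it conceptually mutates a passed-in `ancestors` dict in place — the theorems are about the return value).

-- ===== PORT A =====
-- loop body of A: ensure ancestors[child] exists, update it with ancestors[root], add root
def pvStepA (d : PySem.Dict Int (List Int)) (n c : Int) : PySem.Dict Int (List Int) :=
  let d1 := if d.contains c then d else d.insert c ([] : List Int)
  let d2 := d1.insert c (PySem.Set.update (d1.getD c []) (d1.getD n []))
  d2.insert c (PySem.Set.add (d2.getD c []) n)

-- A's recursion, fuel = recursion depth (never exhausted on inputs satisfying Pre_, i.e. where Python A returns)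
def goA (nd : PySem.Dict Int (List Int)) : Nat → Int → PySem.Dict Int (List Int) → PySem.Dict Int (List Int)
  | 0, _, d => d
  | f+1, root, d =>
    let d1 := if d.contains root then d else d.insert root ([] : List Int)
    match nd.get? root with
    | none => d1
    | some cs => cs.foldl (fun acc c => goA nd f c (pvStepA acc root c)) d1

def get_nodes_to_all_ancestors_py (nodes : List (Int × List Int)) (root : Int) (ancestors : Option (List (Int × List Int))) : List (Int × List Int) :=
  let anc : PySem.Dict Int (List Int) :=
    match ancestors with
    | none => PySem.Dict.mk [((0 : Int), ([] : List Int))]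
    | some a => PySem.Dict.mk a
  (goA (PySem.Dict.mk nodes) (nodes.length + 1) root anc).items

-- ===== PORT B =====
-- loop body of B (Source B): anc = ancestors.setdefault(child, set()); anc.update(ancestors[node]); anc.add(node)
def pvStepB (d : PySem.Dict Int (List Int)) (n c : Int) : PySem.Dict Int (List Int) :=
  let d1 := d.setdefault c ([] : List Int)
  let d2 := d1.insert c (PySem.Set.update (d1.getD c []) (d1.getD n []))
  d2.insert c (PySem.Set.add (d2.getD c []) n)

-- termination measure machinery for the stack loop (frames carry a depth budget, mirroring goA's fuel)
def pvGrowth (S : Nat) : Nat → Nat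
  | 0 => 1
  | f+1 => 2 + S * pvGrowth S f

def pvMu (S : Nat) (st : List (Int × List Int × Nat)) : Nat :=
  (st.map (fun fr => 1 + fr.2.1.length * pvGrowth S fr.2.2)).sum

theorem pvGrowth_pos (S f : Nat) : 1 ≤ pvGrowth S f := by
  cases f with
  | zero => simp [pvGrowth]
  | succ f => simp [pvGrowth]; omega

theorem pv_get?_mk_length_le (nodes : List (Int × List Int)) (c : Int) (ccs : List Int)
    (h : (PySem.Dict.mk nodes).get? c = some ccs) :
    ccs.length ≤ (nodes.map (fun p => p.2.length)).sum := by
  induction nodes with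
  | nil => simp [PySem.Dict.get?] at h
  | cons p rest ih =>
    rw [show (p :: rest) = ((p.1, p.2) :: rest) from rfl, PySem.Dict.get?_mk_cons] at h
    by_cases hp : (p.1 == c) = true
    · rw [if_pos hp] at h
      cases h
      simp only [List.map_cons, List.sum_cons]
      omega
    · rw [if_neg hp] at h
      have := ih h
      simp only [List.map_cons, List.sum_cons]
      omega

-- B's while loop: stack of frames (node, pending children, depth budget for the children)
def goB (nodes : List (Int × List Int)) : List (Int × List Int × Nat) → PySem.Dict Int (List Int) → PySem.Dict Int (List Int)
  | [], d => d
  | (_, [], _) :: rest, d => goB nodes rest d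
  | (n, c :: cs, f) :: rest, d =>
    let d' := pvStepB d n c
    match f with
    | 0 => goB nodes ((n, cs, 0) :: rest) d'
    | Nat.succ f' =>
      match h : (PySem.Dict.mk nodes).get? c with
      | some ccs => goB nodes ((c, ccs, f') :: (n, cs, Nat.succ f') :: rest) d'
      | none => goB nodes ((n, cs, Nat.succ f') :: rest) d'
termination_by st _ => pvMu ((nodes.map (fun p => p.2.length)).sum) st
decreasing_by
  · simp only [pvMu, List.map_cons, List.sum_cons]
    omega
  · simp only [pvMu, List.map_cons, List.sum_cons, List.length_cons, pvGrowth]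
    omega
  · have hle := pv_get?_mk_length_le nodes c ccs h
    have hmul : ccs.length * pvGrowth ((nodes.map (fun p => p.2.length)).sum) f' ≤
        ((nodes.map (fun p => p.2.length)).sum) * pvGrowth ((nodes.map (fun p => p.2.length)).sum) f' :=
      Nat.mul_le_mul_right _ hle
    have h1 : pvGrowth ((nodes.map (fun p => p.2.length)).sum) (f' + 1) =
        2 + ((nodes.map (fun p => p.2.length)).sum) * pvGrowth ((nodes.map (fun p => p.2.length)).sum) f' := rfl
    have h2 : (cs.length + 1) * pvGrowth ((nodes.map (fun p => p.2.length)).sum) (f' + 1) =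
        cs.length * pvGrowth ((nodes.map (fun p => p.2.length)).sum) (f' + 1) +
          pvGrowth ((nodes.map (fun p => p.2.length)).sum) (f' + 1) := Nat.succ_mul _ _
    simp only [pvMu, List.map_cons, List.sum_cons, List.length_cons, Nat.succ_eq_add_one]
    omega
  · have hpos := pvGrowth_pos ((nodes.map (fun p => p.2.length)).sum) (Nat.succ f')
    have h2 : (cs.length + 1) * pvGrowth ((nodes.map (fun p => p.2.length)).sum) (Nat.succ f') =
        cs.length * pvGrowth ((nodes.map (fun p => p.2.length)).sum) (Nat.succ f') +
          pvGrowth ((nodes.map (fun p => p.2.length)).sum) (Nat.succ f') := Nat.succ_mul _ _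
    simp only [pvMu, List.map_cons, List.sum_cons, List.length_cons]
    omega

def get_nodes_to_all_ancestors_py_alt (nodes : List (Int × List Int)) (root : Int) (ancestors : Option (List (Int × List Int))) : List (Int × List Int) :=
  let anc0 : PySem.Dict Int (List Int) :=
    match ancestors with
    | none => PySem.Dict.mk [((0 : Int), ([] : List Int))]
    | some a => PySem.Dict.mk a
  let anc1 := if anc0.contains root then anc0 else anc0.insert root ([] : List Int)
  let st : List (Int × List Int × Nat) :=
    match (PySem.Dict.mk nodes).get? root with
    | some cs => [(root, cs, nodes.length)]
    | none => []
  (goB nodes st anc1).items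

-- ===== PRECONDITION & SPEC =====
-- successors of k in the children graph, and bounded-iteration reachability closure
def pvSuccs (nodes : List (Int × List Int)) (k : Int) : List Int := ((PySem.Dict.mk nodes).get? k).getD []
def pvReachStep (nodes : List (Int × List Int)) (s : List Int) : List Int :=
  PySem.Set.update s (s.flatMap (pvSuccs nodes))
def pvReach (nodes : List (Int × List Int)) (s : List Int) : List Int :=
  (pvReachStep nodes)^[nodes.length + 1] s

-- Pre_ = the children graph has no cycle reachable from root: exactly there Python A's unbounded
-- recursion (and Python B's stack loop) terminates; on a reachable cycle A raises RecursionError.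
def Pre_get_nodes_to_all_ancestors_py (nodes : List (Int × List Int)) (root : Int) (ancestors : Option (List (Int × List Int))) : Prop :=
  ∀ k ∈ pvReach nodes [root], k ∉ pvReach nodes (pvSuccs nodes k)
instance (nodes : List (Int × List Int)) (root : Int) (ancestors : Option (List (Int × List Int))) : Decidable (Pre_get_nodes_to_all_ancestors_py nodes root ancestors) := by unfold Pre_get_nodes_to_all_ancestors_py; infer_instance

def pvWitness_get_nodes_to_all_ancestors_py : (List (Int × List Int)) × Int × (Option (List (Int × List Int))) :=
  ([(1, [2, 3]), (2, [4])], 1, none)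

def Spec_get_nodes_to_all_ancestors_py (nodes : List (Int × List Int)) (root : Int) (ancestors : Option (List (Int × List Int))) (out : List (Int × List Int)) : Prop := out = get_nodes_to_all_ancestors_py_alt nodes root ancestors
instance (nodes : List (Int × List Int)) (root : Int) (ancestors : Option (List (Int × List Int))) (out : List (Int × List Int)) : Decidable (Spec_get_nodes_to_all_ancestors_py nodes root ancestors out) := by unfold Spec_get_nodes_to_all_ancestors_py; infer_instance

-- ===== CLAIM (what is proved, stated in full; the proofs are below) =====
def Claim_equal_get_nodes_to_all_ancestors_py : Prop := ∀ (nodes : List (Int × List Int)) (root : Int) (ancestors : Option (List (Int × List Int))), Dom_get_nodes_to_all_ancestors_py nodes root ancestors → Pre_get_nodes_to_all_ancestors_py nodes root ancestors → Spec_get_nodes_to_all_ancestors_py nodes root ancestors (get_nodes_to_all_ancestors_py nodes root ancestors)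

-- ===== LEMMAS AND PROOFS =====

theorem pvStepB_eq_pvStepA (d : PySem.Dict Int (List Int)) (n c : Int) :
    pvStepB d n c = pvStepA d n c := by
  unfold pvStepA pvStepB
  by_cases h : d.contains c = true
  · simp only [PySem.Dict.setdefault_of_contains d ([] : List Int) h, if_pos h]
  · simp only [PySem.Dict.setdefault_of_not_contains d ([] : List Int) (by simpa using h), if_neg h]

theorem contains_pvStepB (d : PySem.Dict Int (List Int)) (n c : Int) :
    (pvStepB d n c).contains c = true := by
  unfold pvStepB
  exact PySem.Dict.contains_insert_self _ _ _

-- unrolling goA one level at a node already present in the dict (the re-ensure is a no-op)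
theorem goA_succ_contains (nd : PySem.Dict Int (List Int)) (f : Nat) (c : Int)
    (d : PySem.Dict Int (List Int)) (h : d.contains c = true) :
    goA nd (f+1) c d =
      match nd.get? c with
      | none => d
      | some cs => cs.foldl (fun acc x => goA nd f x (pvStepA acc c x)) d := by
  simp [goA, h]

-- the key simulation lemma: one stack frame computes exactly A's fold over the pending children
theorem goB_frame (nodes : List (Int × List Int)) (f : Nat) :
    ∀ (n : Int) (cs : List Int) (rest : List (Int × List Int × Nat)) (d : PySem.Dict Int (List Int)),
      goB nodes ((n, cs, f) :: rest) d =
        goB nodes rest (cs.foldl (fun acc c => goA (PySem.Dict.mk nodes) f c (pvStepA acc n c)) d) := by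
  induction f with
  | zero =>
    intro n cs
    induction cs with
    | nil => intro rest d; simp [goB]
    | cons c cs ih =>
      intro rest d
      simp only [goB]
      rw [ih]
      simp [goA, pvStepB_eq_pvStepA]
  | succ f' ihf =>
    intro n cs
    induction cs with
    | nil => intro rest d; simp [goB]
    | cons c cs ih =>
      intro rest d
      rw [goB]
      cases hcc : (PySem.Dict.mk nodes).get? c with
      | none =>
        simp only [hcc]
        rw [ih]
        have hA : goA (PySem.Dict.mk nodes) (f'+1) c (pvStepA d n c) = pvStepA d n c := by
          rw [← pvStepB_eq_pvStepA,
            goA_succ_contains _ _ _ _ (contains_pvStepB d n c), hcc]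
        rw [List.foldl_cons, hA, pvStepB_eq_pvStepA]
      | some ccs =>
        simp only [hcc]
        rw [ihf c ccs ((n, cs, f'+1) :: rest) (pvStepB d n c)]
        rw [ih]
        have hA : goA (PySem.Dict.mk nodes) (f'+1) c (pvStepA d n c) =
            ccs.foldl (fun acc x => goA (PySem.Dict.mk nodes) f' x (pvStepA acc c x)) (pvStepA d n c) := by
          rw [← pvStepB_eq_pvStepA,
            goA_succ_contains _ _ _ _ (contains_pvStepB d n c), hcc, pvStepB_eq_pvStepA]
        rw [List.foldl_cons, hA, pvStepB_eq_pvStepA]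

theorem pv_main (nodes : List (Int × List Int)) (root : Int) (ancestors : Option (List (Int × List Int))) :
    get_nodes_to_all_ancestors_py nodes root ancestors = get_nodes_to_all_ancestors_py_alt nodes root ancestors := by
  unfold get_nodes_to_all_ancestors_py get_nodes_to_all_ancestors_py_alt
  simp only [goA]
  cases hr : (PySem.Dict.mk nodes).get? root with
  | none => simp [goB]
  | some cs => simp [goB_frame, goB]

-- ===== VERDICT (by name: the statement is the Claim_ definition above) =====
theorem get_nodes_to_all_ancestors_py_spec : Claim_equal_get_nodes_to_all_ancestors_py := by
  intro nodes root ancestors _ _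
  unfold Spec_get_nodes_to_all_ancestors_py
  exact pv_main nodes root ancestors
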